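-- pv_equiv track=rewrite | github.com/jclements3/trefoil | scripts/validate_hymnal.py | voice_leading_cost
-- ===== SOURCE A (Python) =====
-- def voice_leading_cost(prev_midis, curr_midis):
--     """Total absolute MIDI movement between two chords (minimal matching).
--     Lower = smoother. Uses greedy nearest-note matching."""
--     if not prev_midis or not curr_midis:
--         return 0
--     prev = sorted(prev_midis)
--     curr = sorted(curr_midis)
--     # Pad shorter to match longer
--     while len(prev) < len(curr):
--         prev.append(prev[-1])
--     while len(curr) < len(prev):
--         curr.append(curr[-1])
--     return sum(abs(p - c) for p, c in zip(prev, curr))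
-- ===== SOURCE B (Python) =====
-- def voice_leading_cost(prev_midis, curr_midis):
--     # Sweep-line / CDF formulation: no pairing of notes at all. Each prev note is a
--     # +1 event, each curr note a -1 event; padding becomes a weighted event at each
--     # chord's maximum. Cost = integral over pitch t of |running imbalance|.
--     if not prev_midis or not curr_midis:
--         return 0
--     n = max(len(prev_midis), len(curr_midis))
--     events = [(x, 1) for x in prev_midis] + [(x, -1) for x in curr_midis]
--     events.append((max(prev_midis), n - len(prev_midis)))
--     events.append((max(curr_midis), len(curr_midis) - n))
--     events.sort(key=lambda e: e[0])
--     total = 0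
--     run = 0
--     last = events[0][0]
--     for x, d in events:
--         total += abs(run) * (x - last)
--         run += d
--         last = x
--     return total
-- ===== Notes on version B (the rewrite author's own statement) =====
-- stated objective: alternative
-- what changed: B never pairs notes at all: instead of A's pad-sort-zip pairing it runs a sweep-line over signed pitch events (+1 per prev note, -1 per curr note, weighted events at each chord's maximum for the padding) and accumulates |running imbalance| times the gap between consecutive event pitches - the CDF/Wasserstein-1 formulation of the same cost.
import Mathlib
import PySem

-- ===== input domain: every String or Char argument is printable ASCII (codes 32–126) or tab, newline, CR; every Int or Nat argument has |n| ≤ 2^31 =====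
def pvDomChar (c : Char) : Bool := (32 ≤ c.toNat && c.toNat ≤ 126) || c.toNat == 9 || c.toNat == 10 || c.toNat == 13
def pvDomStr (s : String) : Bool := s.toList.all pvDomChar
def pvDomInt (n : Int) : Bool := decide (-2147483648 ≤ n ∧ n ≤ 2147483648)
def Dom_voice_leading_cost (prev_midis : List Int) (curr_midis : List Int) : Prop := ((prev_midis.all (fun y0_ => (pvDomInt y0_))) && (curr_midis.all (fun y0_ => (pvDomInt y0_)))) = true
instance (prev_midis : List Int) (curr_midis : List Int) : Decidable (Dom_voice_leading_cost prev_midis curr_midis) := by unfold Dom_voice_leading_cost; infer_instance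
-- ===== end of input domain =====

-- B replaces A's pad-sort-zip note pairing by a sweep-line over signed pitch events
-- (the CDF/Wasserstein-1 formulation of the same cost); alternative algorithm, same cost class.

-- ===== PORT A =====
-- the while-loop 'while len(xs) < n: xs.append(xs[-1])' (xs[-1] = getLastD for the nonempty
-- lists A reaches here, guarded by the empty check)
def pvPad (xs : List Int) (n : Nat) : List Int :=
  if _h : xs.length < n then pvPad (xs ++ [xs.getLastD 0]) n else xs
  termination_by n - xs.length
  decreasing_by simp; omega

def voice_leading_cost (prev_midis : List Int) (curr_midis : List Int) : Int :=
  if prev_midis = [] ∨ curr_midis = [] then 0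
  else
    let prev := PySem.List.sorted prev_midis (fun x => x) false
    let curr := PySem.List.sorted curr_midis (fun x => x) false
    let prev1 := pvPad prev curr.length
    let curr1 := pvPad curr prev1.length
    ((prev1.zip curr1).map (fun pc => |pc.1 - pc.2|)).sum

-- ===== PORT B =====
-- max(xs) on the nonempty lists B reaches here: PySem.List.max? with .getD 0
def voice_leading_cost_alt (prev_midis : List Int) (curr_midis : List Int) : Int :=
  if prev_midis = [] ∨ curr_midis = [] then 0
  else
    let n : Int := max (prev_midis.length : Int) (curr_midis.length : Int)
    let events := (prev_midis.map (fun x => (x, (1 : Int)))) ++ (curr_midis.map (fun x => (x, (-1 : Int))))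
      ++ [((PySem.List.max? prev_midis (fun x => x)).getD 0, n - (prev_midis.length : Int)),
          ((PySem.List.max? curr_midis (fun x => x)).getD 0, (curr_midis.length : Int) - n)]
    let es := PySem.List.sorted events (fun e => e.1) false
    let last0 := (es.headD (0, 0)).1
    (es.foldl (fun (s : Int × Int × Int) e =>
        (s.1 + |s.2.1| * (e.1 - s.2.2), s.2.1 + e.2, e.1)) (0, 0, last0)).1

-- ===== PRECONDITION & SPEC =====
def Spec_voice_leading_cost (prev_midis : List Int) (curr_midis : List Int) (out : Int) : Prop := out = voice_leading_cost_alt prev_midis curr_midis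
instance (prev_midis : List Int) (curr_midis : List Int) (out : Int) : Decidable (Spec_voice_leading_cost prev_midis curr_midis out) := by unfold Spec_voice_leading_cost; infer_instance

-- ===== CLAIM (what is proved, stated in full; the proofs are below) =====
def Claim_equal_voice_leading_cost : Prop := ∀ (prev_midis : List Int) (curr_midis : List Int), Dom_voice_leading_cost prev_midis curr_midis → Spec_voice_leading_cost prev_midis curr_midis (voice_leading_cost prev_midis curr_midis)


-- ===== LEMMAS AND PROOFS =====

-- number of elements ≤ t (as an integer)
def cntle (xs : List Int) (t : Int) : Int := (xs.countP (fun x => decide (x ≤ t)) : Int)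

-- net signed weight of the events with key ≤ t
def runOf (es : List (Int × Int)) (t : Int) : Int :=
  ((es.filter (fun e => decide (e.1 ≤ t))).map Prod.snd).sum

-- key of the last event, default d
def lastKey (es : List (Int × Int)) (d : Int) : Int := ((es.getLast?).map Prod.fst).getD d

theorem pvPad_eq (xs : List Int) (n : Nat) :
    pvPad xs n = xs ++ List.replicate (n - xs.length) (xs.getLastD 0) := by
  unfold pvPad
  split
  · rename_i h
    rw [pvPad_eq (xs ++ [xs.getLastD 0]) n]
    have hl : (xs ++ [xs.getLastD 0]).getLastD 0 = xs.getLastD 0 := by simp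
    rw [hl, List.append_assoc]
    congr 1
    have : n - xs.length = (n - (xs.length + 1)) + 1 := by omega
    simp [this, List.replicate_succ]
  · rename_i h
    have : n - xs.length = 0 := by omega
    simp [this]
  termination_by n - xs.length
  decreasing_by simp; omega

theorem sum_ind_ind (n : Nat) : ∀ (a b : Nat), a ≤ n → b ≤ n →
    ∑ i ∈ Finset.range n, |(if i < a then (1:ℤ) else 0) - (if i < b then 1 else 0)| = |(a:ℤ) - b| := by
  induction n with
  | zero => intro a b ha hb; interval_cases a; interval_cases b; simp
  | succ n ih =>
    intro a b ha hb
    rw [Finset.sum_range_succ]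
    by_cases hA : a ≤ n <;> by_cases hB : b ≤ n
    · have h1 : ¬ (n < a) := by omega
      have h2 : ¬ (n < b) := by omega
      rw [ih a b hA hB]; simp [h1, h2]
    · have hb' : b = n + 1 := by omega
      have h1 : ¬ (n < a) := by omega
      have h2 : n < b := by omega
      have hr : ∑ i ∈ Finset.range n, |(if i < a then (1:ℤ) else 0) - (if i < b then 1 else 0)|
          = ∑ i ∈ Finset.range n, |(if i < a then (1:ℤ) else 0) - (if i < n then 1 else 0)| := by
        refine Finset.sum_congr rfl ?_
        intro i hi
        have : i < n := Finset.mem_range.mp hi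
        rw [if_pos (show i < b by omega), if_pos (show i < n by omega)]
      rw [hr, ih a n hA le_rfl]
      simp only [h1, h2, if_pos]
      have hna : (a:ℤ) ≤ n := by exact_mod_cast hA
      subst hb'
      push_cast
      rw [abs_sub_comm ((a:ℤ)) ((n:ℤ)), abs_of_nonneg (by omega : (0:ℤ) ≤ (n:ℤ) - a)]
      rw [abs_sub_comm, abs_of_nonneg (by omega : (0:ℤ) ≤ ((n:ℤ)+1) - a)]
      simp; omega
    · have ha' : a = n + 1 := by omega
      have h1 : n < a := by omega
      have h2 : ¬ (n < b) := by omega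
      have hr : ∑ i ∈ Finset.range n, |(if i < a then (1:ℤ) else 0) - (if i < b then 1 else 0)|
          = ∑ i ∈ Finset.range n, |(if i < n then (1:ℤ) else 0) - (if i < b then 1 else 0)| := by
        refine Finset.sum_congr rfl ?_
        intro i hi
        have : i < n := Finset.mem_range.mp hi
        rw [if_pos (show i < a by omega), if_pos (show i < n by omega)]
      rw [hr, ih n b le_rfl hB]
      simp only [h1, if_pos, h2]
      have hnb : (b:ℤ) ≤ n := by exact_mod_cast hB
      subst ha'
      push_cast
      rw [abs_of_nonneg (by omega : (0:ℤ) ≤ (n:ℤ) - b), abs_of_nonneg (by omega : (0:ℤ) ≤ ((n:ℤ)+1) - b)]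
      simp; omega
    · have ha' : a = n + 1 := by omega
      have hb' : b = n + 1 := by omega
      subst ha'; subst hb'
      have hr : ∑ i ∈ Finset.range n, |(if i < n+1 then (1:ℤ) else 0) - (if i < n+1 then 1 else 0)| = 0 := by
        refine Finset.sum_eq_zero ?_
        intro i hi; simp
      rw [hr]; simp

theorem sum_ico_ind (m M a b : Int) (hma : m ≤ a) (hmb : m ≤ b) (haM : a ≤ M) (hbM : b ≤ M) :
    ∑ t ∈ Finset.Ico m M, |(if a ≤ t then (1:ℤ) else 0) - (if b ≤ t then 1 else 0)| = |a - b| := by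
  have hpt : ∀ t : ℤ, |(if a ≤ t then (1:ℤ) else 0) - (if b ≤ t then 1 else 0)|
      = if t ∈ Finset.Ico (min a b) (max a b) then (1:ℤ) else 0 := by
    intro t
    simp only [Finset.mem_Ico, min_le_iff, lt_max_iff]
    split_ifs <;> simp_all <;> omega
  rw [Finset.sum_congr rfl (fun t _ => hpt t), Finset.sum_ite_mem]
  have hsub : Finset.Ico (min a b) (max a b) ⊆ Finset.Ico m M :=
    Finset.Ico_subset_Ico (le_min hma hmb) (max_le haM hbM)
  rw [Finset.inter_eq_right.mpr hsub, Finset.sum_const, Int.card_Ico]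
  rw [nsmul_eq_mul, mul_one]
  rw [Int.toNat_of_nonneg (by omega : (0:ℤ) ≤ max a b - min a b)]
  rw [abs_sub_comm]; exact max_sub_min_eq_abs a b

theorem sorted_prefix (xs : List Int) (hs : xs.Pairwise (· ≤ ·)) (i : Nat) (hi : i < xs.length) (t : Int) :
    (xs.getD i 0 ≤ t ↔ i < xs.countP (fun x => decide (x ≤ t))) := by
  induction xs generalizing i with
  | nil => simp at hi
  | cons x xs ih =>
    rcases List.pairwise_cons.mp hs with ⟨hx, hxs⟩
    cases i with
    | zero =>
      simp only [List.getD_cons_zero, List.countP_cons]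
      constructor
      · intro h; simp [h]
      · intro h
        by_contra hc
        push Not at hc
        have h0 : xs.countP (fun x => decide (x ≤ t)) = 0 := by
          rw [List.countP_eq_zero]
          intro y hy
          simp only [decide_eq_true_eq]
          exact fun hyt => absurd (le_trans (hx y hy) hyt) (not_le.mpr hc)
        simp [h0, not_le.mpr hc] at h
    | succ i =>
      simp only [List.getD_cons_succ, List.countP_cons]
      by_cases hxt : x ≤ t
      · simp only [hxt, decide_true, if_pos]
        rw [ih hxs i (by simpa using hi)]
        omega
      · have hlen : i < xs.length := by simpa using hi
        have hmem : xs.getD i 0 ∈ xs := by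
          rw [List.getD_eq_getElem _ _ hlen]; exact List.getElem_mem _
        have h0 : xs.countP (fun x => decide (x ≤ t)) = 0 := by
          rw [List.countP_eq_zero]
          intro y hy
          simp only [decide_eq_true_eq]
          exact fun hyt => absurd (le_trans (hx y hy) hyt) hxt
        have hL : ¬ (xs.getD i 0 ≤ t) :=
          fun hle => absurd (le_trans (hx _ hmem) hle) hxt
        have hR : ¬ (i + 1 < xs.countP (fun x => decide (x ≤ t))
            + if decide (x ≤ t) = true then 1 else 0) := by simp [h0, hxt]
        exact iff_of_false hL hR

theorem zip_abs_sum (P C : List Int) (h : P.length = C.length) :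
    ((P.zip C).map (fun pc => |pc.1 - pc.2|)).sum
      = ∑ i ∈ Finset.range P.length, |P.getD i 0 - C.getD i 0| := by
  induction P generalizing C with
  | nil => simp
  | cons p P ih =>
    cases C with
    | nil => simp at h
    | cons c C =>
      simp only [List.zip_cons_cons, List.map_cons, List.sum_cons, List.length_cons]
      rw [Finset.sum_range_succ']
      simp only [List.getD_cons_succ, List.getD_cons_zero]
      rw [ih C (by simpa using h)]
      ring

theorem cntle_append_replicate (S : List Int) (k : Nat) (v t : Int) :
    cntle (S ++ List.replicate k v) t = cntle S t + if v ≤ t then (k:ℤ) else 0 := by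
  simp only [cntle]
  rw [List.countP_append]
  by_cases hv : v ≤ t <;> simp [List.countP_replicate, hv]

theorem getLastD_mem (S : List Int) (h : S ≠ []) : S.getLastD 0 ∈ S := by
  cases S with
  | nil => simp at h
  | cons x xs =>
    have he : (x :: xs).getLastD 0 = (x :: xs).getLast (by simp) := rfl
    rw [he]
    exact List.getLast_mem _

theorem getLastD_isMax (S : List Int) (hs : S.Pairwise (· ≤ ·)) : ∀ a ∈ S, a ≤ S.getLastD 0 := by
  induction S with
  | nil => simp
  | cons x xs ih =>
    rcases List.pairwise_cons.mp hs with ⟨hx, hxs⟩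
    intro a ha
    rcases List.mem_cons.mp ha with rfl | hmem
    · cases xs with
      | nil => simp
      | cons y ys =>
        have : (y :: ys).getLastD 0 ∈ (y :: ys) := getLastD_mem _ (by simp)
        calc a ≤ (y :: ys).getLastD 0 := hx _ this
        _ = (a :: y :: ys).getLastD 0 := by simp
    · cases xs with
      | nil => simp at hmem
      | cons y ys =>
        calc a ≤ (y :: ys).getLastD 0 := ih hxs a hmem
        _ = (x :: y :: ys).getLastD 0 := by simp

theorem pad_pairwise (S : List Int) (hs : S.Pairwise (· ≤ ·)) (k : Nat) :
    (S ++ List.replicate k (S.getLastD 0)).Pairwise (· ≤ ·) := by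
  rw [List.pairwise_append]
  refine ⟨hs, List.pairwise_replicate.mpr (by simp), ?_⟩
  intro a ha b hb
  rw [List.eq_of_mem_replicate hb]
  exact getLastD_isMax S hs a ha

theorem runOf_append (es fs : List (Int × Int)) (t : Int) :
    runOf (es ++ fs) t = runOf es t + runOf fs t := by
  simp [runOf, List.filter_append]

theorem runOf_perm (es fs : List (Int × Int)) (hp : es.Perm fs) (t : Int) :
    runOf es t = runOf fs t := by
  exact List.Perm.sum_eq (List.Perm.map _ (List.Perm.filter _ hp))

theorem runOf_map_const (xs : List Int) (d t : Int) :
    runOf (xs.map (fun x => (x, d))) t = d * cntle xs t := by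
  induction xs with
  | nil => simp [runOf, cntle]
  | cons x xs ih =>
    simp only [runOf, cntle, List.map_cons, List.filter_cons, List.countP_cons] at ih ⊢
    by_cases hx : x ≤ t
    · simp only [hx, decide_true, if_true, List.map_cons, List.sum_cons]
      rw [ih]; push_cast; ring
    · simp only [hx, decide_false, Bool.false_eq_true, if_false]
      rw [ih]; push_cast; ring

theorem runOf_single (x d t : Int) :
    runOf [(x, d)] t = if x ≤ t then d else 0 := by
  by_cases hx : x ≤ t <;> simp [runOf, hx]

theorem runOf_eq_zero_of_lt (es : List (Int × Int)) (t : Int) (h : ∀ e ∈ es, t < e.1) :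
    runOf es t = 0 := by
  have : es.filter (fun e => decide (e.1 ≤ t)) = [] := by
    rw [List.filter_eq_nil_iff]
    intro e he
    simpa using not_le.mpr (h e he)
  simp [runOf, this]

theorem cntle_perm (xs ys : List Int) (hp : xs.Perm ys) (t : Int) : cntle xs t = cntle ys t := by
  simp [cntle, hp.countP_eq]

theorem lastKey_cons (e : Int × Int) (rest : List (Int × Int)) (d : Int) :
    lastKey (e :: rest) d = lastKey rest e.1 := by
  simp [lastKey, List.getLast?_cons]

theorem le_lastKey (rest : List (Int × Int)) (x : Int) (h : ∀ e ∈ rest, x ≤ e.1) :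
    x ≤ lastKey rest x := by
  cases hr : rest.getLast? with
  | none => simp [lastKey, hr]
  | some l =>
    have hl : l ∈ rest := List.mem_of_getLast? hr
    simpa [lastKey, hr] using h l hl

theorem lastKey_isMax (es : List (Int × Int)) (hs : es.Pairwise (fun a b => a.1 ≤ b.1)) (d : Int) :
    ∀ e ∈ es, e.1 ≤ lastKey es d := by
  induction es generalizing d with
  | nil => simp
  | cons e' rest ih =>
    intro e he
    rw [lastKey_cons]
    rcases List.mem_cons.mp he with rfl | hmem
    · exact le_lastKey rest e.1 (List.pairwise_cons.mp hs).1
    · exact ih (List.pairwise_cons.mp hs).2 e'.1 e hmem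

theorem core1 (P C : List Int) (hP : P.Pairwise (· ≤ ·)) (hC : C.Pairwise (· ≤ ·))
    (hlen : P.length = C.length) (m M : Int)
    (hmP : ∀ x ∈ P, m ≤ x) (hmC : ∀ x ∈ C, m ≤ x)
    (hMP : ∀ x ∈ P, x ≤ M) (hMC : ∀ x ∈ C, x ≤ M) :
    ∑ i ∈ Finset.range P.length, |P.getD i 0 - C.getD i 0|
      = ∑ t ∈ Finset.Ico m M, |cntle P t - cntle C t| := by
  have step1 : ∀ i ∈ Finset.range P.length,
      |P.getD i 0 - C.getD i 0|
        = ∑ t ∈ Finset.Ico m M, |(if P.getD i 0 ≤ t then (1:ℤ) else 0) - (if C.getD i 0 ≤ t then 1 else 0)| := by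
    intro i hi
    have hiP : i < P.length := Finset.mem_range.mp hi
    have hiC : i < C.length := by omega
    have hmemP : P.getD i 0 ∈ P := by rw [List.getD_eq_getElem _ _ hiP]; exact List.getElem_mem _
    have hmemC : C.getD i 0 ∈ C := by rw [List.getD_eq_getElem _ _ hiC]; exact List.getElem_mem _
    exact (sum_ico_ind m M _ _ (hmP _ hmemP) (hmC _ hmemC) (hMP _ hmemP) (hMC _ hmemC)).symm
  rw [Finset.sum_congr rfl step1, Finset.sum_comm]
  refine Finset.sum_congr rfl ?_
  intro t _
  have hcongr : ∀ i ∈ Finset.range P.length,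
      |(if P.getD i 0 ≤ t then (1:ℤ) else 0) - (if C.getD i 0 ≤ t then 1 else 0)|
        = |(if i < P.countP (fun x => decide (x ≤ t)) then (1:ℤ) else 0)
            - (if i < C.countP (fun x => decide (x ≤ t)) then 1 else 0)| := by
    intro i hi
    have hiP : i < P.length := Finset.mem_range.mp hi
    have hiC : i < C.length := by omega
    rw [if_congr (sorted_prefix P hP i hiP t) rfl rfl, if_congr (sorted_prefix C hC i hiC t) rfl rfl]
  rw [Finset.sum_congr rfl hcongr,
    sum_ind_ind P.length _ _ (List.countP_le_length ..) (hlen ▸ List.countP_le_length ..)]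
  rfl

theorem fold_eq (es : List (Int × Int)) (total run last : Int)
    (hs : es.Pairwise (fun a b => a.1 ≤ b.1)) (hlast : ∀ e ∈ es, last ≤ e.1) :
    (es.foldl (fun (s : Int × Int × Int) e =>
        (s.1 + |s.2.1| * (e.1 - s.2.2), s.2.1 + e.2, e.1)) (total, run, last)).1
      = total + ∑ t ∈ Finset.Ico last (lastKey es last), |run + runOf es t| := by
  induction es generalizing total run last with
  | nil => simp [lastKey]
  | cons e rest ih =>
    obtain ⟨x, d⟩ := e
    rcases List.pairwise_cons.mp hs with ⟨hx, hrest⟩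
    have hlx : last ≤ x := hlast (x, d) (by simp)
    rw [List.foldl_cons]
    rw [ih (total + |run| * (x - last)) (run + d) x hrest hx]
    rw [lastKey_cons]
    have hxK : x ≤ lastKey rest x := le_lastKey rest x hx
    rw [show lastKey rest (x, d).1 = lastKey rest x from rfl,
      ← Finset.Ico_union_Ico_eq_Ico hlx hxK,
      Finset.sum_union (Finset.Ico_disjoint_Ico_consecutive last x (lastKey rest x))]
    have h1 : ∀ t ∈ Finset.Ico last x, |run + runOf ((x, d) :: rest) t| = |run| := by
      intro t ht
      have htx : t < x := (Finset.mem_Ico.mp ht).2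
      rw [runOf_eq_zero_of_lt]
      · simp
      · intro e he
        rcases List.mem_cons.mp he with rfl | hm
        · exact htx
        · exact lt_of_lt_of_le htx (hx e hm)
    have h2 : ∀ t ∈ Finset.Ico x (lastKey rest x), |run + runOf ((x, d) :: rest) t| = |run + d + runOf rest t| := by
      intro t ht
      have hxt : x ≤ t := (Finset.mem_Ico.mp ht).1
      have hr : runOf ((x, d) :: rest) t = d + runOf rest t := by
        simp [runOf, hxt]
      rw [hr]; ring_nf
    rw [Finset.sum_congr rfl h1, Finset.sum_congr rfl h2, Finset.sum_const]
    rw [Int.card_Ico, nsmul_eq_mul, Int.toNat_of_nonneg (by omega)]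
    ring

-- max(xs) = last element of sorted(xs), for nonempty xs
theorem max_eq_sorted_last (xs : List Int) (h : xs ≠ []) :
    (PySem.List.max? xs (fun x => x)).getD 0 = (PySem.List.sorted xs (fun x => x) false).getLastD 0 := by
  obtain ⟨m, hm⟩ : ∃ m, PySem.List.max? xs (fun x => x) = some m := by
    cases hmm : PySem.List.max? xs (fun x => x) with
    | none => exact absurd ((PySem.List.max?_eq_none_iff _ _).mp hmm) h
    | some m => exact ⟨m, rfl⟩
  have hmem : m ∈ xs := PySem.List.max?_mem hm
  have hmax : ∀ y ∈ xs, y ≤ m := PySem.List.max?_isMax hm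
  have hsne : PySem.List.sorted xs (fun x => x) false ≠ [] :=
    fun hn => h ((PySem.List.sorted_eq_nil_iff _ _ _).mp hn)
  have hLmem : (PySem.List.sorted xs (fun x => x) false).getLastD 0 ∈ xs :=
    (PySem.List.mem_sorted xs (fun x => x) false _).mp (getLastD_mem _ hsne)
  have hLmax : ∀ y ∈ xs, y ≤ (PySem.List.sorted xs (fun x => x) false).getLastD 0 := by
    intro y hy
    exact getLastD_isMax _ (PySem.List.sorted_pairwise xs (fun x => x)) y
      ((PySem.List.mem_sorted xs (fun x => x) false y).mpr hy)
  rw [hm, Option.getD_some]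
  exact le_antisymm (hLmax _ hmem) (hmax _ hLmem)

-- ===== VERDICT =====
theorem voice_leading_cost_spec : Claim_equal_voice_leading_cost := by
  intro prev_midis curr_midis _
  unfold Spec_voice_leading_cost voice_leading_cost voice_leading_cost_alt
  by_cases hpc : prev_midis = [] ∨ curr_midis = []
  · simp [hpc]
  · rw [if_neg hpc, if_neg hpc]
    have hp : prev_midis ≠ [] := fun h => hpc (Or.inl h)
    have hc : curr_midis ≠ [] := fun h => hpc (Or.inr h)
    -- abbreviations
    set Sp := PySem.List.sorted prev_midis (fun x => x) false with hSp
    set Sc := PySem.List.sorted curr_midis (fun x => x) false with hSc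
    have hSpP : Sp.Pairwise (· ≤ ·) := PySem.List.sorted_pairwise prev_midis (fun x => x)
    have hScP : Sc.Pairwise (· ≤ ·) := PySem.List.sorted_pairwise curr_midis (fun x => x)
    have hSpperm : Sp.Perm prev_midis := PySem.List.sorted_perm ..
    have hScperm : Sc.Perm curr_midis := PySem.List.sorted_perm ..
    have hSplen : Sp.length = prev_midis.length := hSpperm.length_eq
    have hSclen : Sc.length = curr_midis.length := hScperm.length_eq
    have hSpne : Sp ≠ [] := fun hn => hp ((PySem.List.sorted_eq_nil_iff _ _ _).mp hn)
    have hScne : Sc ≠ [] := fun hn => hc ((PySem.List.sorted_eq_nil_iff _ _ _).mp hn)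
    set maxP := Sp.getLastD 0 with hmaxP
    set maxC := Sc.getLastD 0 with hmaxC
    have hMP : (PySem.List.max? prev_midis (fun x => x)).getD 0 = maxP := max_eq_sorted_last _ hp
    have hMC : (PySem.List.max? curr_midis (fun x => x)).getD 0 = maxC := max_eq_sorted_last _ hc
    set np := prev_midis.length with hnp
    set nc := curr_midis.length with hnc
    -- the padded lists of A
    have hprev1 : pvPad Sp Sc.length = Sp ++ List.replicate (nc - np) maxP := by
      rw [pvPad_eq]; rw [hSclen, hSplen]
    have hprev1len : (pvPad Sp Sc.length).length = max np nc := by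
      rw [hprev1]; simp [hSplen]; omega
    have hcurr1 : pvPad Sc (pvPad Sp Sc.length).length = Sc ++ List.replicate (max np nc - nc) maxC := by
      rw [pvPad_eq]; rw [hprev1len, hSclen]
    set P := Sp ++ List.replicate (nc - np) maxP with hPdef
    set C := Sc ++ List.replicate (max np nc - nc) maxC with hCdef
    have hPpair : P.Pairwise (· ≤ ·) := pad_pairwise Sp hSpP _
    have hCpair : C.Pairwise (· ≤ ·) := pad_pairwise Sc hScP _
    have hPlen : P.length = max np nc := by simp [hPdef, hSplen]; omega
    have hClen : C.length = max np nc := by simp [hCdef, hSclen]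
    -- the event list of B
    set ev := (prev_midis.map (fun x => (x, (1 : Int)))) ++ (curr_midis.map (fun x => (x, (-1 : Int))))
      ++ [((PySem.List.max? prev_midis (fun x => x)).getD 0, (max (np:Int) (nc:Int)) - (np:Int)),
          ((PySem.List.max? curr_midis (fun x => x)).getD 0, (nc:Int) - (max (np:Int) (nc:Int)))] with hev
    set es := PySem.List.sorted ev (fun e => e.1) false with hes
    have hesP : es.Pairwise (fun a b => a.1 ≤ b.1) := PySem.List.sorted_pairwise ev (fun e => e.1)
    have hesperm : es.Perm ev := PySem.List.sorted_perm ..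
    have hevne : ev ≠ [] := by simp [hev]
    have hesne : es ≠ [] := fun hn => hevne ((PySem.List.sorted_eq_nil_iff _ _ _).mp hn)
    obtain ⟨e0, es', hes0⟩ : ∃ e0 es', es = e0 :: es' := by
      cases hE : es with
      | nil => exact absurd hE hesne
      | cons a l => exact ⟨a, l, rfl⟩
    have hes0' : PySem.List.sorted ev (fun e => e.1) = e0 :: es' := hes.symm.trans hes0
    have hhead : ∀ e ∈ es, e0.1 ≤ e.1 := by
      intro e he
      exact PySem.List.key_head_sorted_le ev (fun e => e.1) hes0' e ((PySem.List.mem_sorted ev (fun e => e.1) false e).mp he)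
    set m := (es.headD (0, 0)).1 with hm
    have hm0 : m = e0.1 := by rw [hm, hes0]; rfl
    set M := lastKey es m with hM
    -- every key of ev lies in [m, M]
    have hkey_lo : ∀ e ∈ ev, m ≤ e.1 := by
      intro e he
      rw [hm0]
      exact PySem.List.key_head_sorted_le ev (fun e => e.1) hes0' e he
    have hkey_hi : ∀ e ∈ ev, e.1 ≤ M := by
      intro e he
      exact lastKey_isMax es hesP m e (hesperm.mem_iff.mpr he)
    -- elements of P and C are keys of ev
    have hmemP_ev : ∀ x ∈ P, ∃ d, ((x, d) : Int × Int) ∈ ev := by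
      intro x hx
      rcases List.mem_append.mp hx with hx | hx
      · exact ⟨1, by
          simp only [hev]
          refine List.mem_append.mpr (Or.inl (List.mem_append.mpr (Or.inl ?_)))
          exact List.mem_map.mpr ⟨x, hSpperm.mem_iff.mp hx, rfl⟩⟩
      · refine ⟨(max (np:Int) (nc:Int)) - (np:Int), ?_⟩
        rw [List.eq_of_mem_replicate hx]
        simp only [hev]
        refine List.mem_append.mpr (Or.inr ?_)
        simp [hMP]
    have hmemC_ev : ∀ x ∈ C, ∃ d, ((x, d) : Int × Int) ∈ ev := by
      intro x hx
      rcases List.mem_append.mp hx with hx | hx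
      · exact ⟨-1, by
          simp only [hev]
          refine List.mem_append.mpr (Or.inl (List.mem_append.mpr (Or.inr ?_)))
          exact List.mem_map.mpr ⟨x, hScperm.mem_iff.mp hx, rfl⟩⟩
      · refine ⟨(nc:Int) - (max (np:Int) (nc:Int)), ?_⟩
        rw [List.eq_of_mem_replicate hx]
        simp only [hev]
        refine List.mem_append.mpr (Or.inr ?_)
        simp [hMC]
    have hmP' : ∀ x ∈ P, m ≤ x := fun x hx => by
      obtain ⟨d, hd⟩ := hmemP_ev x hx; exact hkey_lo _ hd
    have hmC' : ∀ x ∈ C, m ≤ x := fun x hx => by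
      obtain ⟨d, hd⟩ := hmemC_ev x hx; exact hkey_lo _ hd
    have hMP' : ∀ x ∈ P, x ≤ M := fun x hx => by
      obtain ⟨d, hd⟩ := hmemP_ev x hx; exact hkey_hi _ hd
    have hMC' : ∀ x ∈ C, x ≤ M := fun x hx => by
      obtain ⟨d, hd⟩ := hmemC_ev x hx; exact hkey_hi _ hd
    -- the pointwise identity: runOf ev t = cntle P t - cntle C t
    have hrun : ∀ t : Int, runOf ev t = cntle P t - cntle C t := by
      intro t
      have h1 : runOf ev t
          = 1 * cntle prev_midis t + ((-1) * cntle curr_midis t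
            + ((if maxP ≤ t then (max (np:Int) (nc:Int)) - (np:Int) else 0)
              + (if maxC ≤ t then (nc:Int) - (max (np:Int) (nc:Int)) else 0))) := by
        rw [hev, runOf_append, runOf_append,
          show [((PySem.List.max? prev_midis (fun x => x)).getD 0, (max (np:Int) (nc:Int)) - (np:Int)),
                ((PySem.List.max? curr_midis (fun x => x)).getD 0, (nc:Int) - (max (np:Int) (nc:Int)))]
             = [((PySem.List.max? prev_midis (fun x => x)).getD 0, (max (np:Int) (nc:Int)) - (np:Int))]
               ++ [((PySem.List.max? curr_midis (fun x => x)).getD 0, (nc:Int) - (max (np:Int) (nc:Int)))] from rfl,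
          runOf_append, runOf_map_const, runOf_map_const, runOf_single, runOf_single, hMP, hMC]
        ring
      have h2 : cntle P t = cntle prev_midis t + if maxP ≤ t then ((nc - np : Nat) : Int) else 0 := by
        rw [hPdef, cntle_append_replicate, cntle_perm Sp prev_midis hSpperm]
      have h3 : cntle C t = cntle curr_midis t + if maxC ≤ t then ((max np nc - nc : Nat) : Int) else 0 := by
        rw [hCdef, cntle_append_replicate, cntle_perm Sc curr_midis hScperm]
      rw [h1, h2, h3]
      split_ifs <;> push_cast <;> omega
    -- A's sum equals the Ico sum
    have hA : ((P.zip C).map (fun pc => |pc.1 - pc.2|)).sum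
        = ∑ t ∈ Finset.Ico m M, |cntle P t - cntle C t| := by
      rw [zip_abs_sum P C (by rw [hPlen, hClen])]
      exact core1 P C hPpair hCpair (by rw [hPlen, hClen]) m M hmP' hmC' hMP' hMC'
    -- B's fold equals the same sum
    have hB : (es.foldl (fun (s : Int × Int × Int) e =>
          (s.1 + |s.2.1| * (e.1 - s.2.2), s.2.1 + e.2, e.1)) (0, 0, m)).1
        = ∑ t ∈ Finset.Ico m M, |cntle P t - cntle C t| := by
      rw [fold_eq es 0 0 m hesP (fun e he => by rw [hm0]; exact hhead e he)]
      rw [zero_add]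
      refine Finset.sum_congr rfl ?_
      intro t _
      rw [zero_add, runOf_perm es ev hesperm, hrun]
    simp only [← hes, ← hev]
    have hcurr1' : pvPad Sc P.length = C := by rw [← hprev1]; exact hcurr1
    rw [hprev1, hcurr1', hA, ← hm, hB]
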